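-- pv_equiv track=rewrite | github.com/cuhk-s3/Archer | experiment/3-real-world/gen_affected_components.py | compute_category_stats
-- ===== SOURCE A (Python) =====
-- from collections import defaultdict
--
-- def compute_category_stats(
--   categories_per_commit: list[list[str]],
-- ) -> list[tuple[str, int, int]]:
--   category_commits: dict[str, int] = defaultdict(int)
--   category_files: dict[str, int] = defaultdict(int)
--   for categories in categories_per_commit:
--     for category in set(categories):
--       category_commits[category] += 1
--     for category in categories:
--       category_files[category] += 1
--   return [
--     (category, category_commits[category], category_files[category])
--     for category in sorted(category_files.keys())
--   ]
-- ===== SOURCE B (Python) =====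
-- def _runlength(xs):
--     # xs sorted; run-length encode: list of (value, multiplicity)
--     out = []
--     for x in xs:
--         if out and out[-1][0] == x:
--             out[-1] = (x, out[-1][1] + 1)
--         else:
--             out.append((x, 1))
--     return out
--
--
-- def compute_category_stats(categories_per_commit):
--     commit_items = sorted(c for cats in categories_per_commit for c in set(cats))
--     file_items = sorted(c for cats in categories_per_commit for c in cats)
--     commit_counts = dict(_runlength(commit_items))
--     return [(c, commit_counts.get(c, 0), n) for c, n in _runlength(file_items)]
-- ===== Notes on version B (the rewrite author's own statement) =====
-- stated objective: alternative
-- what changed: Replaces the hash-dict counting loops by flatten-sort-then-run-length-group: both per-commit and per-file category occurrences are flattened into lists, sorted, and run-length encoded, the sorted file groups giving the output order directly.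
import Mathlib
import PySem

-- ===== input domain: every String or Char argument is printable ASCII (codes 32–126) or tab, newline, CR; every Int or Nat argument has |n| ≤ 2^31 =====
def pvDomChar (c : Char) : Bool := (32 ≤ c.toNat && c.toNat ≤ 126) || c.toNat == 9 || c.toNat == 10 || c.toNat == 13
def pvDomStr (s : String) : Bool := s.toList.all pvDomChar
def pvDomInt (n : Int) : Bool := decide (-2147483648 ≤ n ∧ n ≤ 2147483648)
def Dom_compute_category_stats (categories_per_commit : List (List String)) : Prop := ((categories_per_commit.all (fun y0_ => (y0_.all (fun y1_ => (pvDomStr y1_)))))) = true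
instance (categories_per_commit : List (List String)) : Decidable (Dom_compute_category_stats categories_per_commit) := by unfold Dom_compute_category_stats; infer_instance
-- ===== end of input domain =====

-- B counts by flatten-sort-then-run-length-grouping of the flattened category lists instead of A's hash-dict counting loops; an alternative decomposition with the same results.


-- ===== PORT A =====
def compute_category_stats (categories_per_commit : List (List String)) : List (String × Int × Int) :=
  let dicts := categories_per_commit.foldl
    (fun (st : PySem.Dict String Int × PySem.Dict String Int) categories =>
      ((PySem.Set.ofList categories).foldl (fun d category => d.modify category 0 (· + 1)) st.1,
       categories.foldl (fun d category => d.modify category 0 (· + 1)) st.2))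
    (PySem.Dict.empty, PySem.Dict.empty)
  (PySem.List.sorted dicts.2.keys (fun k => k)).map
    (fun category => (category, dicts.1.getD category 0, dicts.2.getD category 0))

-- ===== PORT B =====
def runlength (xs : List String) : List (String × Int) :=
  xs.foldl (fun out x =>
    match out.getLast? with
    | some p => if p.1 = x then out.dropLast ++ [(x, p.2 + 1)] else out ++ [(x, 1)]
    | none => out ++ [(x, 1)]) []

def compute_category_stats_alt (categories_per_commit : List (List String)) : List (String × Int × Int) :=
  let commit_items := PySem.List.sorted (categories_per_commit.flatMap (fun cats => PySem.Set.ofList cats)) (fun c => c)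
  let file_items := PySem.List.sorted (categories_per_commit.flatMap (fun cats => cats)) (fun c => c)
  let commit_counts := PySem.Dict.ofList (runlength commit_items)
  (runlength file_items).map (fun p => (p.1, commit_counts.getD p.1 0, p.2))

-- ===== PRECONDITION & SPEC =====
def Spec_compute_category_stats (categories_per_commit : List (List String)) (out : List (String × Int × Int)) : Prop := out = compute_category_stats_alt categories_per_commit
instance (categories_per_commit : List (List String)) (out : List (String × Int × Int)) : Decidable (Spec_compute_category_stats categories_per_commit out) := by unfold Spec_compute_category_stats; infer_instance

-- ===== CLAIM (what is proved, stated in full; the proofs are below) =====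
def Claim_equal_compute_category_stats : Prop := ∀ (categories_per_commit : List (List String)), Dom_compute_category_stats categories_per_commit → Spec_compute_category_stats categories_per_commit (compute_category_stats categories_per_commit)

-- ===== LEMMAS AND PROOFS =====

-- splitting A's product fold into two independent folds
lemma foldl_prod_split (l : List (List String)) (d1 d2 : PySem.Dict String Int) :
    l.foldl (fun (st : PySem.Dict String Int × PySem.Dict String Int) cats =>
      ((PySem.Set.ofList cats).foldl (fun d c => d.modify c 0 (· + 1)) st.1,
       cats.foldl (fun d c => d.modify c 0 (· + 1)) st.2)) (d1, d2)
    = (l.foldl (fun d cats => (PySem.Set.ofList cats).foldl (fun d c => d.modify c 0 (· + 1)) d) d1,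
       l.foldl (fun d cats => cats.foldl (fun d c => d.modify c 0 (· + 1)) d) d2) := by
  induction l generalizing d1 d2 with
  | nil => rfl
  | cons c t ih => simp [List.foldl_cons, ih]

lemma foldl_foldl_flatMap (g : List String → List String) (l : List (List String)) (d : PySem.Dict String Int) :
    l.foldl (fun d cats => (g cats).foldl (fun d c => d.modify c 0 (· + 1)) d) d
    = (l.flatMap g).foldl (fun d c => d.modify c 0 (· + 1)) d := by
  induction l generalizing d with
  | nil => rfl
  | cons c t ih => simp [List.foldl_cons, List.flatMap_cons, List.foldl_append, ih]

-- the deduplication of a weakly sorted list is strictly sorted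
lemma pairwise_lt_ofList (xs : List String) (h : xs.Pairwise (· ≤ ·)) :
    (PySem.Set.ofList xs).Pairwise (· < ·) := by
  induction xs using List.reverseRecOn with
  | nil => simp [PySem.Set.ofList_nil]
  | append_singleton t x ih =>
    rw [PySem.Set.ofList_append_singleton]
    rw [List.pairwise_append] at h
    unfold PySem.Set.add
    split
    · exact ih h.1
    · rename_i hc
      rw [List.pairwise_append]
      refine ⟨ih h.1, List.pairwise_singleton _ _, ?_⟩
      intro a ha b hb
      simp only [List.mem_singleton] at hb
      have hat : a ∈ t := (PySem.Set.mem_ofList t a).mp ha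
      have hle : a ≤ x := h.2.2 a hat x (by simp)
      rw [hb]
      exact lt_of_le_of_ne hle (fun he => hc ((PySem.Set.contains_iff _ _).mpr (he ▸ ha)))

-- run-length encoding of a weakly sorted list = (distinct values, multiplicities)
lemma runlength_eq (xs : List String) (h : xs.Pairwise (· ≤ ·)) :
    runlength xs = (PySem.Set.ofList xs).map (fun c => (c, (xs.count c : Int))) := by
  induction xs using List.reverseRecOn with
  | nil => rfl
  | append_singleton t x ih =>
    have hpt : t.Pairwise (· ≤ ·) := (List.pairwise_append.mp h).1
    have hmax : ∀ a ∈ t, a ≤ x := fun a ha =>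
      (List.pairwise_append.mp h).2.2 a ha x (by simp)
    have hlt := pairwise_lt_ofList t hpt
    have hstep : runlength (t ++ [x]) =
        (match (runlength t).getLast? with
         | some p => if p.1 = x then (runlength t).dropLast ++ [(x, p.2 + 1)]
                     else runlength t ++ [(x, 1)]
         | none => runlength t ++ [(x, 1)]) := by
      simp only [runlength, List.foldl_append, List.foldl_cons, List.foldl_nil]
    rw [hstep, ih hpt, PySem.Set.ofList_append_singleton]
    rcases (PySem.Set.ofList t).eq_nil_or_concat with hS | ⟨T, y, hS⟩
    · have ht : t = [] := by
        rcases t with _ | ⟨a, t'⟩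
        · rfl
        · have hm : a ∈ PySem.Set.ofList (a :: t') := (PySem.Set.mem_ofList _ a).mpr (by simp)
          rw [hS] at hm
          simp at hm
      subst ht
      simp [PySem.Set.add, PySem.Set.ofList_nil]
    · rw [List.concat_eq_append] at hS
      have hy_t : y ∈ t := (PySem.Set.mem_ofList t y).mp (by simp [hS])
      have hT_lt : ∀ a ∈ T, a < y := by
        intro a ha
        have := hS ▸ hlt
        rw [List.pairwise_append] at this
        exact this.2.2 a ha y (by simp)
      have hlast : ((PySem.Set.ofList t).map (fun c => (c, ((t.count c : Nat) : Int)))).getLast?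
          = some (y, (t.count y : Int)) := by
        rw [hS]; simp
      by_cases hxy : x = y
      · subst hxy
        have hcont : (PySem.Set.ofList t).contains x = true := by
          rw [PySem.Set.contains_iff]
          exact (PySem.Set.mem_ofList t x).mpr hy_t
        have hadd : (PySem.Set.ofList t).add x = PySem.Set.ofList t := by
          unfold PySem.Set.add
          rw [if_pos hcont]
        rw [hlast, hadd, hS]
        simp only [List.map_append, List.map_cons, List.map_nil, List.dropLast_concat]
        simp only [if_true]
        congr 1
        · apply List.map_congr_left
          intro a ha
          have hne : a ≠ x := ne_of_lt (hT_lt a ha)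
          have hz : List.count a [x] = 0 := by simp [List.count_eq_zero, hne]
          simp [List.count_append, hz]
        · simp [List.count_append]
      · have hx_not : x ∉ t := by
          intro hx
          have hxS : x ∈ PySem.Set.ofList t := (PySem.Set.mem_ofList t x).mpr hx
          rw [hS] at hxS
          rcases List.mem_append.mp hxS with hxT | hxy'
          · exact absurd (hmax y hy_t) (not_le.mpr (hT_lt x hxT))
          · exact hxy (by simpa using hxy')
        have hcont : (PySem.Set.ofList t).contains x = false := by
          rw [← Bool.not_eq_true, PySem.Set.contains_iff]
          intro hc
          exact hx_not ((PySem.Set.mem_ofList t x).mp hc)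
        have hadd : (PySem.Set.ofList t).add x = PySem.Set.ofList t ++ [x] := by
          unfold PySem.Set.add
          rw [if_neg (fun hh => Bool.false_ne_true (hcont ▸ hh))]
        rw [hlast, hadd]
        simp only [List.map_append, List.map_cons, List.map_nil]
        rw [if_neg (fun he => hxy (Eq.symm he))]
        congr 1
        · apply List.map_congr_left
          intro a ha
          have hne : a ≠ x := fun he => hx_not (he ▸ (PySem.Set.mem_ofList t a).mp ha)
          have hz : List.count a [x] = 0 := by simp [List.count_eq_zero, hne]
          simp [List.count_append, hz]
        · have hc0 : t.count x = 0 := List.count_eq_zero.mpr hx_not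
          simp [List.count_append, hc0]

-- lookup in a dict built from (key, value) pairs over distinct keys
lemma getD_ofList_map (S : List String) (hS : S.Nodup) (f : String → Int) (k : String) :
    (PySem.Dict.ofList (S.map (fun c => (c, f c)))).getD k 0 = if k ∈ S then f k else 0 := by
  have hfold : PySem.Dict.ofList (S.map (fun c => (c, f c)))
      = S.foldl (fun d a => d.insert a (f a)) PySem.Dict.empty := by
    simp [PySem.Dict.ofList, PySem.Dict.update, List.foldl_map]
  have hitems := PySem.Dict.items_foldl_insert_fresh S (fun a => a) f PySem.Dict.empty
    (by intro a _; simp) (by simpa using hS)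
  have hei : (PySem.Dict.empty : PySem.Dict String Int).items = [] := rfl
  rw [hei, List.nil_append] at hitems
  simp only [] at hitems
  have hkeys : (S.foldl (fun d a => d.insert a (f a)) PySem.Dict.empty).keys = S := by
    simp only [PySem.Dict.keys, hitems]
    simp [Function.comp_def]
  rw [hfold]
  split
  · rename_i hk
    refine PySem.Dict.getD_of_mem_items _ ?_ (by rw [hkeys]; exact hS) 0
    rw [hitems]
    exact List.mem_map_of_mem hk
  · rename_i hk
    have hn : (S.foldl (fun d a => d.insert a (f a)) PySem.Dict.empty).get? k = none :=
      (PySem.Dict.get?_eq_none_iff_not_mem_keys _ _).mpr (by rw [hkeys]; exact hk)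
    simp [PySem.Dict.getD, hn]

-- the two ports agree on every input
lemma ports_agree (l : List (List String)) :
    compute_category_stats l = compute_category_stats_alt l := by
  -- names
  set cF := l.flatMap (fun cats => PySem.Set.ofList cats) with hcF
  set fF := l.flatMap (fun cats => cats) with hfF
  set sC := PySem.List.sorted cF (fun c => c) with hsC
  set sF := PySem.List.sorted fF (fun c => c) with hsF
  -- A side
  have hA : compute_category_stats l
      = (PySem.List.sorted (PySem.Set.ofList fF) (fun k => k)).map
          (fun c => (c, ((cF.count c : Nat) : Int), ((fF.count c : Nat) : Int))) := by
    show ((PySem.List.sorted (l.foldl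
      (fun (st : PySem.Dict String Int × PySem.Dict String Int) categories =>
        ((PySem.Set.ofList categories).foldl (fun d category => d.modify category 0 (· + 1)) st.1,
         categories.foldl (fun d category => d.modify category 0 (· + 1)) st.2))
      (PySem.Dict.empty, PySem.Dict.empty)).2.keys (fun k => k)).map _) = _
    rw [foldl_prod_split, foldl_foldl_flatMap, foldl_foldl_flatMap]
    have h1 : (l.flatMap (fun cats => PySem.Set.ofList cats)).foldl
        (fun d c => d.modify c 0 (· + 1)) PySem.Dict.empty = PySem.Dict.counter cF := rfl
    have h2 : (l.flatMap (fun cats => cats)).foldl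
        (fun d c => d.modify c 0 (· + 1)) PySem.Dict.empty = PySem.Dict.counter fF := rfl
    rw [h1, h2, PySem.Dict.keys_counter]
    apply List.map_congr_left
    intro c _
    rw [PySem.Dict.getD_counter, PySem.Dict.getD_counter]
  -- sorted facts
  have hpF : sF.Pairwise (· ≤ ·) := by
    simpa using PySem.List.sorted_pairwise fF (fun c => c)
  have hpC : sC.Pairwise (· ≤ ·) := by
    simpa using PySem.List.sorted_pairwise cF (fun c => c)
  -- B side
  have hB : compute_category_stats_alt l
      = (PySem.Set.ofList sF).map
          (fun c => (c, (PySem.Dict.ofList (runlength sC)).getD c 0, ((sF.count c : Nat) : Int))) := by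
    show (runlength sF).map (fun p => (p.1, (PySem.Dict.ofList (runlength sC)).getD p.1 0, p.2)) = _
    rw [runlength_eq sF hpF, List.map_map]
    rfl
  have hdict : ∀ c, (PySem.Dict.ofList (runlength sC)).getD c 0 = ((cF.count c : Nat) : Int) := by
    intro c
    rw [runlength_eq sC hpC, getD_ofList_map (PySem.Set.ofList sC) (PySem.Set.nodup_ofList sC) _ c]
    have hperm : sC.Perm cF := PySem.List.sorted_perm cF (fun c => c) false
    split
    · rw [hperm.count_eq]
    · rename_i hk
      have : c ∉ cF := fun hc => hk ((PySem.Set.mem_ofList sC c).mpr (hperm.mem_iff.mpr hc))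
      rw [List.count_eq_zero.mpr this]
      simp
  have hset : PySem.List.sorted (PySem.Set.ofList fF) (fun k => k) = PySem.Set.ofList sF := by
    apply PySem.List.sorted_eq_of_perm_of_pairwise_lt
    · refine (List.perm_ext_iff_of_nodup (PySem.Set.nodup_ofList _) (PySem.Set.nodup_ofList _)).mpr ?_
      intro a
      rw [PySem.Set.mem_ofList, PySem.Set.mem_ofList, PySem.List.mem_sorted]
    · simpa using pairwise_lt_ofList sF hpF
  have hcnt : ∀ c, sF.count c = fF.count c :=
    fun c => (PySem.List.sorted_perm fF (fun c => c) false).count_eq c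
  rw [hA, hB, hset]
  apply List.map_congr_left
  intro c _
  simp [hdict c, hcnt c]

-- ===== VERDICT (by name: the statement is the Claim_ definition above) =====
theorem compute_category_stats_spec : Claim_equal_compute_category_stats := by
  intro l _
  unfold Spec_compute_category_stats
  exact ports_agree l
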